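-- pv_equiv track=rewrite | github.com/YH-05/note-finance | tests/scripts/test_e2e_kg_v21_all_waves.py | _collect_all_node_ids
-- ===== SOURCE A (Python) =====
-- from typing import TYPE_CHECKING, Any
--
-- def _collect_all_node_ids(queue_data: dict[str, Any]) -> set[str]:
--     """キューデータ内の全ノード ID をフラットに収集する。
--
--     v2.1 の全ノードタイプ (Source, Entity, Fact, Claim, Chunk,
--     FinancialDataPoint, FiscalPeriod, Author, Stance, Question) を網羅。
--
--     Parameters
--     ----------
--     queue_data : dict[str, Any]
--         graph-queue JSON データ。
--
--     Returns
--     -------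
--     set[str]
--         全ノード ID のセット。
--     """
--     ids: set[str] = set()
--     ids.update(s["source_id"] for s in queue_data.get("sources", []))
--     ids.update(e["entity_id"] for e in queue_data.get("entities", []))
--     ids.update(f["fact_id"] for f in queue_data.get("facts", []))
--     ids.update(c["claim_id"] for c in queue_data.get("claims", []))
--     ids.update(ch["chunk_id"] for ch in queue_data.get("chunks", []))
--     ids.update(dp["datapoint_id"] for dp in queue_data.get("financial_datapoints", []))
--     ids.update(fp["period_id"] for fp in queue_data.get("fiscal_periods", []))
--     ids.update(a["author_id"] for a in queue_data.get("authors", []))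
--     ids.update(st["stance_id"] for st in queue_data.get("stances", []))
--     ids.update(q["question_id"] for q in queue_data.get("questions", []))
--     return ids
-- ===== SOURCE B (Python) =====
-- _SPECS = (
--     ("sources", "source_id"),
--     ("entities", "entity_id"),
--     ("facts", "fact_id"),
--     ("claims", "claim_id"),
--     ("chunks", "chunk_id"),
--     ("financial_datapoints", "datapoint_id"),
--     ("fiscal_periods", "period_id"),
--     ("authors", "author_id"),
--     ("stances", "stance_id"),
--     ("questions", "question_id"),
-- )
--
--
-- def _collect_all_node_ids(queue_data):
--     # Recursively build ONE flat list of all ids (possibly with duplicates),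
--     # then deduplicate once at the very end with a single set() call.
--     def collect(i):
--         if i == len(_SPECS):
--             return []
--         coll, key = _SPECS[i]
--         return [item[key] for item in queue_data.get(coll, [])] + collect(i + 1)
--
--     return set(collect(0))
-- ===== Notes on version B (the rewrite author's own statement) =====
-- stated objective: alternative
-- what changed: Instead of ten imperative statements each updating a mutable set in place, B recursively concatenates the id lists of the ten collections into one flat list and deduplicates once with a single set() at the end.
import Mathlib
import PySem

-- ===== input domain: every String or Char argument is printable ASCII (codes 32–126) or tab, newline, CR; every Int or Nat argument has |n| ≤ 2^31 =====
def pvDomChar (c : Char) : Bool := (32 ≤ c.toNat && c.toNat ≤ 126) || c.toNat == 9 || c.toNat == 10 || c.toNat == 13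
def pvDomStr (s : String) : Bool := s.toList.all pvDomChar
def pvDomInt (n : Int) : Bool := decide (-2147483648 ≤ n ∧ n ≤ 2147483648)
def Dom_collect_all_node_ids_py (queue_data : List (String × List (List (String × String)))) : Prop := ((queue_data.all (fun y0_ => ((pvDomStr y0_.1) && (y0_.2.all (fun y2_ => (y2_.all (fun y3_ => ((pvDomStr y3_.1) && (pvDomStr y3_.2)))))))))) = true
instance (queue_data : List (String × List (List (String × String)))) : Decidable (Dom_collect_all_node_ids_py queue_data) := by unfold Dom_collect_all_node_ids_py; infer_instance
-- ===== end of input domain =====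

-- B replaces A's ten in-place set-update statements by a recursive build of one flat
-- id list followed by a single set() deduplication at the end; objective: alternative.

-- ===== PORT A =====
-- item[key] is ported as (Dict.get? item key).getD ""; exact under Pre_ (the key is present),
-- KeyError inputs are excluded by Pre_collect_all_node_ids_py.
def collect_all_node_ids_py (queue_data : List (String × List (List (String × String)))) : List String :=
  let ids : PySem.Set String := PySem.Set.empty
  let ids := PySem.Set.update ids ((PySem.Dict.getD (PySem.Dict.mk queue_data) "sources" []).map (fun s => (PySem.Dict.get? (PySem.Dict.mk s) "source_id").getD ""))
  let ids := PySem.Set.update ids ((PySem.Dict.getD (PySem.Dict.mk queue_data) "entities" []).map (fun e => (PySem.Dict.get? (PySem.Dict.mk e) "entity_id").getD ""))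
  let ids := PySem.Set.update ids ((PySem.Dict.getD (PySem.Dict.mk queue_data) "facts" []).map (fun f => (PySem.Dict.get? (PySem.Dict.mk f) "fact_id").getD ""))
  let ids := PySem.Set.update ids ((PySem.Dict.getD (PySem.Dict.mk queue_data) "claims" []).map (fun c => (PySem.Dict.get? (PySem.Dict.mk c) "claim_id").getD ""))
  let ids := PySem.Set.update ids ((PySem.Dict.getD (PySem.Dict.mk queue_data) "chunks" []).map (fun ch => (PySem.Dict.get? (PySem.Dict.mk ch) "chunk_id").getD ""))
  let ids := PySem.Set.update ids ((PySem.Dict.getD (PySem.Dict.mk queue_data) "financial_datapoints" []).map (fun dp => (PySem.Dict.get? (PySem.Dict.mk dp) "datapoint_id").getD ""))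
  let ids := PySem.Set.update ids ((PySem.Dict.getD (PySem.Dict.mk queue_data) "fiscal_periods" []).map (fun fp => (PySem.Dict.get? (PySem.Dict.mk fp) "period_id").getD ""))
  let ids := PySem.Set.update ids ((PySem.Dict.getD (PySem.Dict.mk queue_data) "authors" []).map (fun a => (PySem.Dict.get? (PySem.Dict.mk a) "author_id").getD ""))
  let ids := PySem.Set.update ids ((PySem.Dict.getD (PySem.Dict.mk queue_data) "stances" []).map (fun st => (PySem.Dict.get? (PySem.Dict.mk st) "stance_id").getD ""))
  let ids := PySem.Set.update ids ((PySem.Dict.getD (PySem.Dict.mk queue_data) "questions" []).map (fun q => (PySem.Dict.get? (PySem.Dict.mk q) "question_id").getD ""))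
  ids

-- ===== PORT B =====
-- the spec table _SPECS of Source B
def pvSpecs : List (String × String) :=
  [("sources", "source_id"), ("entities", "entity_id"), ("facts", "fact_id"),
   ("claims", "claim_id"), ("chunks", "chunk_id"),
   ("financial_datapoints", "datapoint_id"), ("fiscal_periods", "period_id"),
   ("authors", "author_id"), ("stances", "stance_id"), ("questions", "question_id")]

-- Source B's inner recursive 'collect(i)' (index recursion rendered as structural recursion
-- on the remaining suffix of the spec table); item[key] ported as (Dict.get? item key).getD "".
def pvCollect (queue_data : List (String × List (List (String × String)))) : List (String × String) → List String
  | [] => []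
  | ck :: rest =>
      ((PySem.Dict.getD (PySem.Dict.mk queue_data) ck.1 []).map
        (fun item => (PySem.Dict.get? (PySem.Dict.mk item) ck.2).getD "")) ++ pvCollect queue_data rest

-- flat list first, then one set() at the end
def collect_all_node_ids_py_alt (queue_data : List (String × List (List (String × String)))) : List String :=
  PySem.Set.ofList (pvCollect queue_data pvSpecs)

-- ===== PRECONDITION & SPEC =====
-- Pre_ excludes exactly the inputs on which A (and B) raise KeyError: some item in one of the
-- ten collections lacks its id field. On every input where A returns, Pre_ holds.
def Pre_collect_all_node_ids_py (queue_data : List (String × List (List (String × String)))) : Prop :=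
  ∀ ck ∈ pvSpecs, ∀ it ∈ PySem.Dict.getD (PySem.Dict.mk queue_data) ck.1 ([] : List (List (String × String))),
    (PySem.Dict.get? (PySem.Dict.mk it) ck.2).isSome
instance (queue_data : List (String × List (List (String × String)))) : Decidable (Pre_collect_all_node_ids_py queue_data) := by unfold Pre_collect_all_node_ids_py; infer_instance

def pvWitness_collect_all_node_ids_py : (List (String × List (List (String × String)))) :=
  [("sources", [[("source_id", "s1")]]), ("facts", [[("fact_id", "f1"), ("x", "y")]])]

def Spec_collect_all_node_ids_py (queue_data : List (String × List (List (String × String)))) (out : List String) : Prop := out = collect_all_node_ids_py_alt queue_data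
instance (queue_data : List (String × List (List (String × String)))) (out : List String) : Decidable (Spec_collect_all_node_ids_py queue_data out) := by unfold Spec_collect_all_node_ids_py; infer_instance

-- ===== CLAIM (what is proved, stated in full; the proofs are below) =====
def Claim_equal_collect_all_node_ids_py : Prop := ∀ (queue_data : List (String × List (List (String × String)))), Dom_collect_all_node_ids_py queue_data → Pre_collect_all_node_ids_py queue_data → Spec_collect_all_node_ids_py queue_data (collect_all_node_ids_py queue_data)

-- ===== LEMMAS AND PROOFS =====

-- dedup-at-the-end of concatenated lists equals A's chain of incremental set updates:
-- both are the same left fold of PySem.Set.add over the concatenation.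
theorem ports_eq (queue_data : List (String × List (List (String × String)))) :
    collect_all_node_ids_py queue_data = collect_all_node_ids_py_alt queue_data := by
  simp [collect_all_node_ids_py, collect_all_node_ids_py_alt, pvSpecs, pvCollect,
        PySem.Set.ofList, PySem.Set.update, PySem.Set.empty, List.foldl_append]

-- ===== VERDICT (by name: the statement is the Claim_ definition above) =====
theorem collect_all_node_ids_py_spec : Claim_equal_collect_all_node_ids_py := by
  intro qd _ _
  exact ports_eq qd
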